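-- pv_equiv track=rewrite | github.com/openxjarvis/clawdbot-python | openclaw/agents/context_pruning/pruner.py | _take_tail_from_joined_text
-- ===== SOURCE A (Python) =====
-- def _take_tail_from_joined_text(parts: list[str], max_chars: int) -> str:
--     """Take last max_chars from joined text parts."""
--     if max_chars <= 0 or not parts:
--         return ""
--
--     remaining = max_chars
--     out: list[str] = []
--
--     for i in range(len(parts) - 1, -1, -1):
--         if remaining <= 0:
--             break
--
--         p = parts[i]
--         if len(p) <= remaining:
--             out.append(p)
--             remaining -= len(p)
--         else:
--             out.append(p[len(p) - remaining:])
--             remaining = 0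
--             break
--
--         if remaining > 0 and i > 0:
--             out.append("\n")
--             remaining -= 1
--
--     out.reverse()
--     return "".join(out)
-- ===== SOURCE B (Python) =====
-- def _take_tail_from_joined_text(parts: list[str], max_chars: int) -> str:
--     """Take last max_chars from joined text parts."""
--     if max_chars <= 0 or not parts:
--         return ""
--     return "\n".join(parts)[-max_chars:]
-- ===== Notes on version B (the rewrite author's own statement) =====
-- stated objective: simpler
-- what changed: Replaced the reverse index loop with per-part newline bookkeeping by a single closed-form expression: join all parts once and slice the last max_chars characters.
import Mathlib
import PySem

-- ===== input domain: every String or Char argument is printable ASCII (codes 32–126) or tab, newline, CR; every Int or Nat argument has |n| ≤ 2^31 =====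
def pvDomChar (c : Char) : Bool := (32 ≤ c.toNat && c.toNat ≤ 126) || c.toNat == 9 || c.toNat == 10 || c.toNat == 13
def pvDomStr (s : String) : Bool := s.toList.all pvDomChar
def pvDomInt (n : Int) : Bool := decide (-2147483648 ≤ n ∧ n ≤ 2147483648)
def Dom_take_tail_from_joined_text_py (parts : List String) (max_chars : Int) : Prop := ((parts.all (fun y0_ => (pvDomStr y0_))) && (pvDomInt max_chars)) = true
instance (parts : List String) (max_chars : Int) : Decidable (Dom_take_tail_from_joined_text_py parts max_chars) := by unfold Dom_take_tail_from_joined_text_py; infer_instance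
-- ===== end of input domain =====

-- B replaces A's reverse index loop (with its per-part newline bookkeeping) by the closed form
-- "join all parts once, slice the last max_chars characters"; proved equal on all inputs in Dom.


-- ===== PORT A =====
-- the for-loop 'for i in range(len(parts)-1, -1, -1)' as structural recursion on the fuel i+1:
-- fuel f processes indices f-1, f-2, …, 0; `out` accumulates appended pieces exactly as Python's list does.
def pvLoopA (ps : List (List Char)) : Nat → Int → List (List Char) → List (List Char)
  | 0, _, out => out
  | i + 1, remaining, out =>
    if remaining ≤ 0 then out                           -- 'if remaining <= 0: break'
    else
      let p := ps.getD i []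
      if (p.length : Int) ≤ remaining then
        let out' := out ++ [p]                          -- out.append(p)
        let r' := remaining - (p.length : Int)          -- remaining -= len(p)
        if r' > 0 ∧ 0 < i then
          pvLoopA ps i (r' - 1) (out' ++ [['\n']])      -- out.append("\n"); remaining -= 1
        else
          pvLoopA ps i r' out'
      else                                              -- out.append(p[len(p) - remaining:]); break
        out ++ [PySem.List.slice p (some ((p.length : Int) - remaining)) none]

def take_tail_from_joined_text_py (parts : List String) (max_chars : Int) : String :=
  if max_chars ≤ 0 ∨ parts = [] then "" else
    let ps := parts.map String.toList
    -- out.reverse(); return "".join(out)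
    String.ofList (((pvLoopA ps ps.length max_chars []).reverse).flatten)

-- ===== PORT B =====
def take_tail_from_joined_text_py_alt (parts : List String) (max_chars : Int) : String :=
  if max_chars ≤ 0 ∨ parts = [] then "" else
    PySem.Str.slice (PySem.Str.join "\n" parts) (some (-max_chars)) none

-- ===== PRECONDITION & SPEC =====
def Spec_take_tail_from_joined_text_py (parts : List String) (max_chars : Int) (out : String) : Prop := out = take_tail_from_joined_text_py_alt parts max_chars
instance (parts : List String) (max_chars : Int) (out : String) : Decidable (Spec_take_tail_from_joined_text_py parts max_chars out) := by unfold Spec_take_tail_from_joined_text_py; infer_instance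

-- ===== CLAIM (what is proved, stated in full; the proofs are below) =====
def Claim_equal_take_tail_from_joined_text_py : Prop := ∀ (parts : List String) (max_chars : Int), Dom_take_tail_from_joined_text_py parts max_chars → Spec_take_tail_from_joined_text_py parts max_chars (take_tail_from_joined_text_py parts max_chars)

-- ===== LEMMAS AND PROOFS =====

-- take the last r characters (Python's xs[-r:] for r ≥ 1, and all of xs when r ≥ len)
def pvTR (r : Nat) (xs : List Char) : List Char := xs.drop (xs.length - r)

theorem pvTR_append_of_le (xs ys : List Char) (r : Nat) (h : r ≤ ys.length) :
    pvTR r (xs ++ ys) = pvTR r ys := by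
  unfold pvTR
  have hlen : (xs ++ ys).length - r = xs.length + (ys.length - r) := by simp; omega
  rw [hlen, List.drop_append]
  simp

theorem pvTR_append_of_ge (xs ys : List Char) (r : Nat) (h : ys.length ≤ r) :
    pvTR r (xs ++ ys) = pvTR (r - ys.length) xs ++ ys := by
  unfold pvTR
  have hlen : (xs ++ ys).length - r = xs.length - (r - ys.length) := by simp; omega
  rw [hlen, List.drop_append_of_le_length (by omega)]

theorem pvTR_all (xs : List Char) (r : Nat) (h : xs.length ≤ r) : pvTR r xs = xs := by
  unfold pvTR
  have : xs.length - r = 0 := by omega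
  simp [this]

-- the joined prefix parts[0:i] as Python's "\n".join builds it
def pvJ (ps : List (List Char)) (i : Nat) : List Char := List.intercalate ['\n'] (ps.take i)

theorem pvInterCC (sep a b : List Char) (u : List (List Char)) :
    List.intercalate sep (a :: b :: u) = a ++ sep ++ List.intercalate sep (b :: u) := by
  simp [List.intercalate, List.intersperse]

theorem pvInterApp (sep y : List Char) (xs : List (List Char)) (h : xs ≠ []) :
    List.intercalate sep (xs ++ [y]) = List.intercalate sep xs ++ sep ++ y := by
  induction xs with
  | nil => simp at h
  | cons a t ih =>
    cases t with
    | nil => simp [List.intercalate]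
    | cons b u =>
      have h2 := ih (by simp)
      simp only [List.cons_append] at *
      rw [pvInterCC, pvInterCC, h2]
      simp

theorem pvJ_succ (ps : List (List Char)) (i : Nat) (hi : i < ps.length) :
    pvJ ps (i + 1) = if i = 0 then ps.getD i [] else pvJ ps i ++ '\n' :: ps.getD i [] := by
  unfold pvJ
  rw [List.take_add_one]
  have : ps[i]? = some (ps.getD i []) := by
    rw [List.getD_eq_getElem ps [] hi]; exact List.getElem?_eq_getElem hi
  rw [this]
  rcases Nat.eq_zero_or_pos i with h0 | h0
  · subst h0; simp [List.intercalate]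
  · have hne : ps.take i ≠ [] := by
      intro h
      rw [List.take_eq_nil_iff] at h
      rcases h with h | h
      · omega
      · subst h; simp at hi
    simp only [if_neg (by omega : ¬ i = 0), Option.toList]
    rw [pvInterApp _ _ _ hne]
    simp

-- main loop invariant: running A's loop from fuel i with budget r prepends the last r characters
-- of "\n".join(parts[0:i]) to what out already holds
theorem pvLoopA_invariant (ps : List (List Char)) :
    ∀ i, i ≤ ps.length → ∀ (r : Int), 0 ≤ r → ∀ out,
      ((pvLoopA ps i r out).reverse).flatten = pvTR r.toNat (pvJ ps i) ++ (out.reverse).flatten := by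
  intro i
  induction i with
  | zero =>
    intro _ r _ out
    simp [pvLoopA, pvJ, pvTR, List.intercalate]
  | succ i ih =>
    intro hle r hr out
    have hi : i < ps.length := by omega
    set p := ps.getD i [] with hp
    rw [pvLoopA]
    by_cases hr0 : r ≤ 0
    · have : r = 0 := le_antisymm hr0 hr
      subst this
      simp [pvTR]
    · simp only [if_neg hr0, ← hp]
      have hr1 : 1 ≤ r := by omega
      by_cases hlen : (p.length : Int) ≤ r
      · simp only [if_pos hlen]
        by_cases hc : r - (p.length : Int) > 0 ∧ 0 < i
        · -- append p and "\n", continue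
          simp only [if_pos hc]
          rw [ih (by omega) (r - (p.length : Int) - 1) (by omega)]
          rw [pvJ_succ ps i hi, if_neg (by omega : ¬ i = 0)]
          have hch : ('\n' :: p).length ≤ r.toNat := by
            simp; omega
          have := pvTR_append_of_ge (pvJ ps i) ('\n' :: p) r.toNat (by simpa using hch)
          rw [show pvJ ps i ++ '\n' :: p = pvJ ps i ++ ('\n' :: p) from rfl, this]
          have : r.toNat - ('\n' :: p).length = (r - (p.length : Int) - 1).toNat := by
            simp; omega
          rw [this]
          simp
        · -- no newline: either budget exhausted (r = len p) or i = 0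
          simp only [if_neg hc]
          rw [ih (by omega) (r - (p.length : Int)) (by omega)]
          rw [pvJ_succ ps i hi]
          by_cases hz : i = 0
          · -- i = 0 : the whole join is just p, and r ≥ len p takes all of it
            subst hz
            have hJ0 : pvJ ps 0 = [] := by simp [pvJ, List.intercalate]
            simp only [if_true, ← hp, hJ0]
            rw [pvTR_all p r.toNat (by omega)]
            simp [pvTR]
          · -- i > 0, so r = len p exactly: pvTR r picks exactly p, and the recursive budget is 0
            have hreq : r = (p.length : Int) := by
              rcases not_and_or.mp hc with hre | hi0
              · omega
              · exact absurd (by omega) hi0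
            simp only [if_neg hz]
            rw [show pvJ ps i ++ '\n' :: p = (pvJ ps i ++ ['\n']) ++ p from by simp]
            rw [pvTR_append_of_le _ _ _ (by simp; omega)]
            rw [pvTR_all p r.toNat (by omega)]
            have h0 : (r - (p.length : Int)).toNat = 0 := by omega
            rw [h0]
            simp [pvTR]
      · -- p longer than budget: take the tail slice of p and stop
        simp only [if_neg hlen]
        push Not at hlen
        rw [PySem.List.slice_from _ (by omega : (0:Int) ≤ (p.length : Int) - r)]
        rw [pvJ_succ ps i hi]
        have hsl : ((p.length : Int) - r).toNat = p.length - r.toNat := by omega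
        have hend : pvTR r.toNat (if i = 0 then p else pvJ ps i ++ '\n' :: p) = p.drop (p.length - r.toNat) := by
          by_cases hz : i = 0
          · rw [if_pos hz]; rfl
          · rw [if_neg hz]
            rw [show pvJ ps i ++ '\n' :: p = (pvJ ps i ++ ['\n']) ++ p from by simp]
            rw [pvTR_append_of_le _ _ _ (by omega)]
            rfl
        rw [hend, hsl]
        simp

theorem take_tail_main (parts : List String) (max_chars : Int) :
    take_tail_from_joined_text_py parts max_chars = take_tail_from_joined_text_py_alt parts max_chars := by
  unfold take_tail_from_joined_text_py take_tail_from_joined_text_py_alt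
  by_cases hg : max_chars ≤ 0 ∨ parts = []
  · simp [hg]
  · simp only [if_neg hg]
    push Not at hg
    obtain ⟨hm, hne⟩ := hg
    have hinv := pvLoopA_invariant (parts.map String.toList) (parts.map String.toList).length
      (le_refl _) max_chars (by omega) []
    simp only [List.reverse_nil, List.flatten_nil, List.append_nil] at hinv
    rw [hinv]
    have hk : -max_chars = -((max_chars.toNat : Nat) : Int) := by omega
    rw [← String.ofList_toList (s := PySem.Str.slice (PySem.Str.join "\n" parts) (some (-max_chars)) none)]
    congr 1
    have hk' : 0 < max_chars.toNat := by omega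
    rw [PySem.Str.toList_slice, PySem.Str.toList_join, PySem.Chars.slice_eq_listSlice, hk,
        PySem.List.slice_from_neg_natCast _ _ hk']
    have hJ : PySem.Chars.join "\n".toList (parts.map String.toList) =
        List.intercalate ['\n'] (parts.map String.toList) := rfl
    rw [hJ]
    simp only [pvTR, pvJ]
    rw [List.take_of_length_le (by simp)]

-- ===== VERDICT (by name: the statement is the Claim_ definition above) =====
theorem take_tail_from_joined_text_py_spec : Claim_equal_take_tail_from_joined_text_py := by
  intro parts max_chars _
  exact take_tail_main parts max_chars
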